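-- pv_equiv track=rewrite | github.com/exc33ded/GFG-Practice | Medium/Longest subsequence-1/longest-subsequence1.py | longestSubseq
-- ===== SOURCE A (Python) =====
-- from typing import List
--
-- def longestSubseq(n : int, a : List[int]) -> int:
--     # code here
--     d = dict()
--     ans = 0
--     for x in a:
--         y = max(d.get(x - 1, 0), d.get(x + 1, 0))
--         d[x] = max(d.get(x, 0), y + 1)
--         ans = max(ans, d[x])
--     return ans
-- ===== SOURCE B (Python) =====
-- from typing import List
--
-- def longestSubseq(n : int, a : List[int]) -> int:
--     # Classic O(m^2) index DP: dp[i] = longest valid subsequence ending at i.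
--     m = len(a)
--     dp = [1] * m
--     ans = 0
--     for i in range(m):
--         for j in range(i):
--             if abs(a[i] - a[j]) == 1 and dp[j] + 1 > dp[i]:
--                 dp[i] = dp[j] + 1
--         if dp[i] > ans:
--             ans = dp[i]
--     return ans
-- ===== Notes on version B (the rewrite author's own statement) =====
-- stated objective: alternative
-- what changed: Replaced the single-pass value-indexed dict DP with the classic quadratic index DP over positions (dp[i] = 1 + best dp[j] over earlier j with |a[i]-a[j]| == 1).
import Mathlib
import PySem

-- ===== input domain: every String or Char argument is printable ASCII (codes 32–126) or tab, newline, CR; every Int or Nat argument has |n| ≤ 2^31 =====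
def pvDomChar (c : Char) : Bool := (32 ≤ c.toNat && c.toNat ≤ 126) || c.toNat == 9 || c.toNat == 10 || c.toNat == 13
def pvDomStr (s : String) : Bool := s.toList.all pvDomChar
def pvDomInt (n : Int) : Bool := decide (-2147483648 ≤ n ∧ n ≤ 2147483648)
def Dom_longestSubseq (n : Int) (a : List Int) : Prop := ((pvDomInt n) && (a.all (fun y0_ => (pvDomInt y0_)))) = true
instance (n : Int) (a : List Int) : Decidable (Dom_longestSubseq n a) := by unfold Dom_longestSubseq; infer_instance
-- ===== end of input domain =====

-- B replaces A's single-pass value-indexed dict DP by the classic quadratic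
-- position-indexed DP (alternative decomposition, not faster).

-- ===== PORT A =====
-- one loop iteration: y = max(d.get(x-1,0), d.get(x+1,0)); d[x] = max(d.get(x,0), y+1); ans = max(ans, d[x])
def aStep (st : PySem.Dict Int Int × Int) (x : Int) : PySem.Dict Int Int × Int :=
  let d := st.1
  let y := max (d.getD (x - 1) 0) (d.getD (x + 1) 0)
  let d2 := d.insert x (max (d.getD x 0) (y + 1))
  (d2, max st.2 (d2.getD x 0))

def longestSubseq (n : Int) (a : List Int) : Int :=
  (a.foldl aStep (PySem.Dict.empty, 0)).2

-- ===== PORT B =====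
-- inner loop "for j in range(i): if abs(a[i]-a[j])==1 and dp[j]+1>dp[i]: dp[i]=dp[j]+1",
-- over the processed prefix carried as (value, dp) pairs; dp[i] starts at 1.
def altInner (x : Int) (prev : List (Int × Int)) : Int :=
  prev.foldl (fun c p => if (x - p.1 = 1 ∨ x - p.1 = -1) ∧ p.2 + 1 > c then p.2 + 1 else c) 1

-- outer loop "for i in range(m)": prev is the prefix a[:i] zipped with dp[:i]
def altLoop (rest : List Int) (prev : List (Int × Int)) (ans : Int) : Int :=
  match rest with
  | [] => ans
  | x :: rest =>
    let cur := altInner x prev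
    altLoop rest (prev ++ [(x, cur)]) (if cur > ans then cur else ans)

def longestSubseq_alt (n : Int) (a : List Int) : Int := altLoop a [] 0

-- ===== PRECONDITION & SPEC =====
def Spec_longestSubseq (n : Int) (a : List Int) (out : Int) : Prop := out = longestSubseq_alt n a
instance (n : Int) (a : List Int) (out : Int) : Decidable (Spec_longestSubseq n a out) := by unfold Spec_longestSubseq; infer_instance

-- ===== CLAIM (what is proved, stated in full; the proofs are below) =====
def Claim_equal_longestSubseq : Prop := ∀ (n : Int) (a : List Int), Dom_longestSubseq n a → Spec_longestSubseq n a (longestSubseq n a)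

-- ===== LEMMAS AND PROOFS =====

-- max dp value among prefix entries holding value v (0 if none)
def mx (v : Int) (prev : List (Int × Int)) : Int :=
  prev.foldl (fun m p => if p.1 = v then max m p.2 else m) 0

theorem mx_aux_ge (v : Int) : ∀ (prev : List (Int × Int)) (s : Int),
    s ≤ prev.foldl (fun m p => if p.1 = v then max m p.2 else m) s := by
  intro prev
  induction prev with
  | nil => intro s; simp
  | cons p rest ih =>
    intro s
    simp only [List.foldl_cons]
    refine le_trans ?_ (ih _)
    split <;> omega

theorem mx_nonneg (v : Int) (prev : List (Int × Int)) : 0 ≤ mx v prev :=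
  mx_aux_ge v prev 0

theorem mx_append (v x c : Int) (prev : List (Int × Int)) :
    mx v (prev ++ [(x, c)]) = if x = v then max (mx v prev) c else mx v prev := by
  simp [mx, List.foldl_append]

theorem inner_eq (x : Int) : ∀ (prev : List (Int × Int)),
    altInner x prev = 1 + max (mx (x - 1) prev) (mx (x + 1) prev) := by
  intro prev
  induction prev using List.reverseRecOn with
  | nil => simp [altInner, mx]
  | append_singleton rest p ih =>
    obtain ⟨px, pc⟩ := p
    have h1 := mx_nonneg (x - 1) rest
    have h2 := mx_nonneg (x + 1) rest
    simp only [altInner, List.foldl_append, List.foldl_cons, List.foldl_nil] at *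
    rw [ih, mx_append, mx_append]
    split_ifs <;> omega

theorem loop_eq : ∀ (rest : List Int) (d : PySem.Dict Int Int) (prev : List (Int × Int)) (ans : Int),
    (∀ v, d.getD v 0 = mx v prev) → (∀ v, d.getD v 0 ≤ ans) →
    (rest.foldl aStep (d, ans)).2 = altLoop rest prev ans := by
  intro rest
  induction rest with
  | nil => intro d prev ans _ _; simp [altLoop]
  | cons x rest ih =>
    intro d prev ans hval hle
    simp only [List.foldl_cons, altLoop]
    have hcur : altInner x prev = 1 + max (d.getD (x - 1) 0) (d.getD (x + 1) 0) := by
      rw [inner_eq, hval (x - 1), hval (x + 1)]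
    have hy := hle x
    set y := max (d.getD (x - 1) 0) (d.getD (x + 1) 0) with hydef
    set d2 := d.insert x (max (d.getD x 0) (y + 1)) with hd2
    have hget : ∀ v, d2.getD v 0 = if v = x then max (d.getD x 0) (y + 1) else d.getD v 0 := by
      intro v; rw [hd2, PySem.Dict.getD_insert]
    have hcur' : altInner x prev = y + 1 := by rw [hcur]; omega
    have hstep : aStep (d, ans) x
        = (d2, if altInner x prev > ans then altInner x prev else ans) := by
      unfold aStep
      simp only [hcur']
      congr 1
      rw [hget x, if_pos rfl]
      have h2 := hle x
      simp only [max_def]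
      split_ifs <;> omega
    rw [hstep, ih d2 (prev ++ [(x, altInner x prev)])]
    · intro v
      rw [hget v, mx_append]
      rcases eq_or_ne v x with h | h
      · simp [h, hcur', hval x]
      · rw [if_neg h, if_neg (fun hh => h hh.symm)]; exact hval v
    · intro v
      rw [hget v]
      have h1 := hle v
      have h2 := hle x
      simp only [hcur', max_def]
      split_ifs <;> omega

-- ===== VERDICT (by name: the statement is the Claim_ definition above) =====
theorem longestSubseq_spec : Claim_equal_longestSubseq := by
  intro n a _
  show longestSubseq n a = longestSubseq_alt n a
  unfold longestSubseq longestSubseq_alt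
  apply loop_eq
  · intro v; simp [mx, PySem.Dict.getD_empty]
  · intro v; simp [PySem.Dict.getD_empty]
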